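-- pv_equiv track=rewrite | github.com/chinski99/zaprzyjaznij | szlaki.py | szlaki
-- ===== SOURCE A (Python) =====
-- def szlaki(a, b, c):
--     n = len(a)
--     d = dict()
--     res = 0
--     for i in range(n):
--         if a[i] not in d:
--             d[a[i]] = []
--         if b[i] not in d:
--             d[b[i]] = []
--         d[a[i]].append((b[i], c[i]))
--         d[b[i]].append((a[i], c[i]))
--     for k in d:
--         d2 = {}
--         for _, t in d[k]:
--             if t not in d2:
--                 d2[t] = 0
--             d2[t] += 1
--         for t in d2:
--             res += sum(range(d2[t]))
--     return res
-- ===== SOURCE B (Python) =====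
-- def szlaki(a, b, c):
--     cnt = {}
--     for x, y, t in zip(a, b, c):
--         cnt[(x, t)] = cnt.get((x, t), 0) + 1
--         cnt[(y, t)] = cnt.get((y, t), 0) + 1
--     return sum(v * (v - 1) // 2 for v in cnt.values())
-- ===== Notes on version B (the rewrite author's own statement) =====
-- stated objective: simpler
-- what changed: B replaces A's adjacency-list build plus nested per-node/per-color regrouping loops by a single pass keeping one counter keyed by (endpoint, color), then sums v*(v-1)//2 over its values in closed form instead of sum(range(v)).
import Mathlib
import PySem

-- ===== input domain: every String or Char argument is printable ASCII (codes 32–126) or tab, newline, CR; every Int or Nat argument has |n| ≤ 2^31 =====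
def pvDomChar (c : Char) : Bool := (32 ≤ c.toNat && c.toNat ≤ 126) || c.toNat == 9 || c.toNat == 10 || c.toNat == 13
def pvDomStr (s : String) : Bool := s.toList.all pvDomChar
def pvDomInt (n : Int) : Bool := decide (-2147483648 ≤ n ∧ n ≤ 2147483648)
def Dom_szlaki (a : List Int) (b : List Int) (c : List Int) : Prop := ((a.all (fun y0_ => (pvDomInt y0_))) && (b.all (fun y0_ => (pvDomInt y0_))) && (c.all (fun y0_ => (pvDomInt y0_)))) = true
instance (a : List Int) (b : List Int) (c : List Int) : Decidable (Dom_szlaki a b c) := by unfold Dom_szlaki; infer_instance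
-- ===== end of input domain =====

-- B replaces A's adjacency-list build plus nested per-node regrouping by one flat
-- counter keyed by (endpoint, color) and a closed-form pair count (objective: simpler).

-- ===== PORT A =====
def szlaki (a : List Int) (b : List Int) (c : List Int) : Int :=
  let n : Int := (a.length : Int)
  -- Python evaluates a[i], b[i], c[i] afresh at each occurrence; ported the same way
  let d : PySem.Dict Int (List (Int × Int)) :=
    (PySem.List.pyRange 0 n 1).foldl (fun d i =>
      let d1 := if d.contains (PySem.List.pyGetD a i 0) then d else d.insert (PySem.List.pyGetD a i 0) []
      let d2 := if d1.contains (PySem.List.pyGetD b i 0) then d1 else d1.insert (PySem.List.pyGetD b i 0) []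
      let d3 := d2.modify (PySem.List.pyGetD a i 0) [] (fun l => l ++ [(PySem.List.pyGetD b i 0, PySem.List.pyGetD c i 0)])
      d3.modify (PySem.List.pyGetD b i 0) [] (fun l => l ++ [(PySem.List.pyGetD a i 0, PySem.List.pyGetD c i 0)])) PySem.Dict.empty
  d.keys.foldl (fun res k =>
    let d2 : PySem.Dict Int Int :=
      (d.getD k []).foldl (fun d2 p =>
        let d2' := if d2.contains p.2 then d2 else d2.insert p.2 0
        d2'.modify p.2 0 (fun v => v + 1)) PySem.Dict.empty
    d2.keys.foldl (fun res t =>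
      res + (PySem.List.pyRange 0 (d2.getD t 0) 1).foldl (fun s x => s + x) 0) res) 0

-- ===== PORT B =====
def szlaki_alt (a : List Int) (b : List Int) (c : List Int) : Int :=
  let cnt : PySem.Dict (Int × Int) Int :=
    (a.zip (b.zip c)).foldl (fun cnt p =>
      let c1 := cnt.insert (p.1, p.2.2) (cnt.getD (p.1, p.2.2) 0 + 1)
      c1.insert (p.2.1, p.2.2) (c1.getD (p.2.1, p.2.2) 0 + 1)) PySem.Dict.empty
  cnt.values.foldl (fun s v => s + PySem.Int.floordiv (v * (v - 1)) 2) 0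

-- ===== PRECONDITION & SPEC =====
-- Pre_: A indexes b[i] and c[i] for every i < len(a); shorter b or c raises IndexError.
def Pre_szlaki (a : List Int) (b : List Int) (c : List Int) : Prop :=
  a.length ≤ b.length ∧ a.length ≤ c.length
instance (a : List Int) (b : List Int) (c : List Int) : Decidable (Pre_szlaki a b c) := by unfold Pre_szlaki; infer_instance
def pvWitness_szlaki : List Int × List Int × List Int := ([1, 2, 1], [2, 3, 3], [7, 7, 7])

def Spec_szlaki (a : List Int) (b : List Int) (c : List Int) (out : Int) : Prop := out = szlaki_alt a b c
instance (a : List Int) (b : List Int) (c : List Int) (out : Int) : Decidable (Spec_szlaki a b c out) := by unfold Spec_szlaki; infer_instance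

-- ===== CLAIM (what is proved, stated in full; the proofs are below) =====
def Claim_equal_szlaki : Prop := ∀ (a : List Int) (b : List Int) (c : List Int), Dom_szlaki a b c → Pre_szlaki a b c → Spec_szlaki a b c (szlaki a b c)

-- ===== LEMMAS AND PROOFS =====

theorem dict_eq_of_keys_getD {κ ν : Type} [BEq κ] [LawfulBEq κ] (d d' : PySem.Dict κ ν) (dflt : ν)
    (hnd : d.keys.Nodup) (hk : d.keys = d'.keys) (hg : ∀ k, d.getD k dflt = d'.getD k dflt) : d = d' := by
  apply PySem.Dict.ext
  rw [PySem.Dict.items_eq_map_keys d hnd dflt, PySem.Dict.items_eq_map_keys d' (hk ▸ hnd) dflt, hk]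
  exact List.map_congr_left (fun k _ => by rw [hg])

theorem nodup_keys_setdefault {κ ν : Type} [BEq κ] [LawfulBEq κ] (d : PySem.Dict κ ν) (k : κ) (v : ν)
    (hnd : d.keys.Nodup) : (d.setdefault k v).keys.Nodup := by
  rw [PySem.Dict.keys_setdefault]
  split_ifs with h
  · exact hnd
  · refine List.Nodup.append hnd (List.nodup_singleton k) ?_
    intro x hx hmem
    rw [List.mem_singleton] at hmem; subst hmem
    exact absurd ((PySem.Dict.contains_iff_mem_keys d x).mpr hx) (by simp [h])

theorem nodup_keys_modify {κ ν : Type} [BEq κ] [LawfulBEq κ] (d : PySem.Dict κ ν) (k : κ) (d0 : ν) (f : ν → ν)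
    (hnd : d.keys.Nodup) : (d.modify k d0 f).keys.Nodup := by
  rw [PySem.Dict.keys_modify]
  exact PySem.Dict.nodup_keys_insert d k _ hnd

theorem keys_modify_eq {κ ν : Type} [BEq κ] [LawfulBEq κ] (d : PySem.Dict κ ν) (k : κ) (d0 : ν) (f : ν → ν) :
    (d.modify k d0 f).keys = if d.contains k then d.keys else d.keys ++ [k] := by
  rw [PySem.Dict.keys_modify]
  by_cases h : d.contains k
  · rw [PySem.Dict.keys_insert_of_contains _ _ h]; simp [h]
  · rw [PySem.Dict.keys_insert_of_not_contains _ _ (by simpa using h)]; simp [h]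

theorem getD_setdefault_of_ne' {κ ν : Type} [BEq κ] [LawfulBEq κ] (d : PySem.Dict κ ν) {k k' : κ} (v d0 : ν)
    (h : k' ≠ k) : (d.setdefault k v).getD k' d0 = d.getD k' d0 := by
  rw [PySem.Dict.getD_eq_get?_getD, PySem.Dict.get?_setdefault_of_ne d v h, ← PySem.Dict.getD_eq_get?_getD]

-- L1: setdefault then modify at the same key/default collapses to modify
theorem setdefault_modify {κ ν : Type} [BEq κ] [LawfulBEq κ] [DecidableEq κ] (d : PySem.Dict κ ν) (k : κ)
    (v0 : ν) (f : ν → ν) (hnd : d.keys.Nodup) :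
    (d.setdefault k v0).modify k v0 f = d.modify k v0 f := by
  apply dict_eq_of_keys_getD _ _ v0 (nodup_keys_modify _ _ _ _ (nodup_keys_setdefault _ _ _ hnd))
  · rw [keys_modify_eq, keys_modify_eq, PySem.Dict.keys_setdefault]
    by_cases h : d.contains k
    · simp [h, PySem.Dict.contains_setdefault]
    · simp [h, PySem.Dict.contains_setdefault]
  · intro k'
    rw [PySem.Dict.getD_modify, PySem.Dict.getD_modify]
    by_cases h : k' = k
    · simp [h, PySem.Dict.getD_setdefault_self]
    · simp [h, getD_setdefault_of_ne' d v0 v0 h]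

-- L2: a setdefault at y commutes past a modify at an already-present key x
theorem setdefault_modify_comm {κ ν : Type} [BEq κ] [LawfulBEq κ] [DecidableEq κ] (d : PySem.Dict κ ν)
    (x y : κ) (v0 : ν) (f : ν → ν) (hx : d.contains x = true) (hnd : d.keys.Nodup) :
    (d.setdefault y v0).modify x v0 f = (d.modify x v0 f).setdefault y v0 := by
  by_cases hy : d.contains y
  · rw [PySem.Dict.setdefault_of_contains d v0 hy,
      PySem.Dict.setdefault_of_contains _ v0 (by simp [PySem.Dict.contains_modify, hy])]
  · have hyx : y ≠ x := fun h => by rw [h] at hy; exact hy hx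
    rw [PySem.Dict.setdefault_of_not_contains d v0 (by simpa using hy),
      PySem.Dict.setdefault_of_not_contains _ v0
        (by simp [PySem.Dict.contains_modify, hyx, (by simpa using hy : d.contains y = false)])]
    apply dict_eq_of_keys_getD _ _ v0
      (nodup_keys_modify _ _ _ _ (PySem.Dict.nodup_keys_insert _ _ _ hnd))
    · rw [keys_modify_eq, PySem.Dict.keys_insert_of_not_contains _ _ (by simpa using hy),
        PySem.Dict.keys_insert_of_not_contains _ _
          (by simp [PySem.Dict.contains_modify, hyx, (by simpa using hy : d.contains y = false)]),
        keys_modify_eq]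
      simp [PySem.Dict.contains_insert, hx]
    · intro k'
      simp only [PySem.Dict.getD_modify, PySem.Dict.getD_insert]
      by_cases h1 : k' = x
      · simp [h1, Ne.symm hyx]
      · by_cases h2 : k' = y <;> simp [h1, h2, hyx]

-- the per-edge body of A's first loop collapses to two modifies
theorem stepA_eq (d : PySem.Dict Int (List (Int × Int))) (x y t : Int) (hnd : d.keys.Nodup) :
    (let d1 := if d.contains x then d else d.insert x [];
     let d2 := if d1.contains y then d1 else d1.insert y [];
     let d3 := d2.modify x [] (fun l => l ++ [(y, t)]);
     d3.modify y [] (fun l => l ++ [(x, t)]))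
    = (d.modify x [] (fun l => l ++ [(y, t)])).modify y [] (fun l => l ++ [(x, t)]) := by
  have hsd : ∀ (e : PySem.Dict Int (List (Int × Int))) (k : Int),
      (if e.contains k then e else e.insert k []) = e.setdefault k [] := by
    intro e k
    by_cases h : e.contains k
    · simp [h, PySem.Dict.setdefault_of_contains e _ h]
    · simp [h, PySem.Dict.setdefault_of_not_contains e _ (by simpa using h)]
  simp only [hsd]
  rw [setdefault_modify_comm (d.setdefault x []) x y [] _
        (by simp [PySem.Dict.contains_setdefault]) (nodup_keys_setdefault _ _ _ hnd),
      setdefault_modify d x [] _ hnd,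
      setdefault_modify (d.modify x [] _) y [] _ (nodup_keys_modify _ _ _ _ hnd)]

-- fold with two updates per element = fold over the flattened occurrence list
theorem foldl_range_getD3 {σ : Type} (F : σ → Int → Int → Int → σ) :
    ∀ (a b c : List Int), a.length ≤ b.length → a.length ≤ c.length → ∀ s : σ,
      (List.range a.length).foldl (fun s k => F s (a.getD k 0) (b.getD k 0) (c.getD k 0)) s
        = (a.zip (b.zip c)).foldl (fun s e => F s e.1 e.2.1 e.2.2) s := by
  intro a
  induction a with
  | nil => intro b c _ _ s; simp
  | cons x a' ih =>
    intro b c hb hc s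
    match b, c with
    | y :: b', z :: c' =>
      simp only [List.length_cons, List.range_succ_eq_map, List.foldl_cons, List.foldl_map,
        List.getD_cons_zero, List.getD_cons_succ, List.zip_cons_cons]
      exact ih b' c' (by simpa using hb) (by simpa using hc) _

theorem foldl_pyRange3 {σ : Type} (F : σ → Int → Int → Int → σ)
    (a b c : List Int) (hb : a.length ≤ b.length) (hc : a.length ≤ c.length) (s : σ) :
    (PySem.List.pyRange 0 (a.length : Int) 1).foldl
        (fun s i => F s (PySem.List.pyGetD a i 0) (PySem.List.pyGetD b i 0) (PySem.List.pyGetD c i 0)) s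
      = (a.zip (b.zip c)).foldl (fun s e => F s e.1 e.2.1 e.2.2) s := by
  rw [PySem.List.pyRange_one]
  simp only [Int.sub_zero, Int.toNat_natCast, List.foldl_map, zero_add, PySem.List.pyGetD_natCast]
  exact foldl_range_getD3 F a b c hb hc s

theorem foldA : ∀ (E : List (Int × Int × Int)) (d : PySem.Dict Int (List (Int × Int))), d.keys.Nodup →
    E.foldl (fun d e =>
      let d1 := if d.contains e.1 then d else d.insert e.1 [];
      let d2 := if d1.contains e.2.1 then d1 else d1.insert e.2.1 [];
      let d3 := d2.modify e.1 [] (fun l => l ++ [(e.2.1, e.2.2)]);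
      d3.modify e.2.1 [] (fun l => l ++ [(e.1, e.2.2)])) d
    = E.foldl (fun d e =>
        (d.modify e.1 [] (fun l => l ++ [(e.2.1, e.2.2)])).modify e.2.1 [] (fun l => l ++ [(e.1, e.2.2)])) d := by
  intro E
  induction E with
  | nil => intro d _; rfl
  | cons e E ih =>
    intro d hnd
    simp only [List.foldl_cons]
    rw [stepA_eq d e.1 e.2.1 e.2.2 hnd]
    exact ih _ (nodup_keys_modify _ _ _ _ (nodup_keys_modify _ _ _ _ hnd))

theorem foldInner : ∀ (l : List (Int × Int)) (d2 : PySem.Dict Int Int), d2.keys.Nodup →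
    l.foldl (fun d2 p =>
      let d2' := if d2.contains p.2 then d2 else d2.insert p.2 0;
      d2'.modify p.2 0 (fun v => v + 1)) d2
    = l.foldl (fun d2 p => d2.modify p.2 0 (fun v => v + 1)) d2 := by
  intro l
  induction l with
  | nil => intro d2 _; rfl
  | cons p l ih =>
    intro d2 hnd
    simp only [List.foldl_cons]
    have hsd : (if d2.contains p.2 then d2 else d2.insert p.2 0) = d2.setdefault p.2 0 := by
      by_cases h : d2.contains p.2
      · simp [h, PySem.Dict.setdefault_of_contains d2 _ h]
      · simp [h, PySem.Dict.setdefault_of_not_contains d2 _ (by simpa using h)]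
    rw [show (let d2' := if d2.contains p.2 then d2 else d2.insert p.2 0;
          d2'.modify p.2 0 (fun v => v + 1)) = d2.modify p.2 0 (fun v => v + 1) by
        rw [hsd]; exact setdefault_modify d2 p.2 0 _ hnd]
    exact ih _ (nodup_keys_modify _ _ _ _ hnd)

theorem sum_pyRange_gauss (n : Nat) :
    (PySem.List.pyRange 0 (n : Int) 1).foldl (fun s x => s + x) 0 = ((n * (n - 1) / 2 : Nat) : Int) := by
  rw [PySem.List.pyRange_one]
  simp only [Int.sub_zero, Int.toNat_natCast, List.foldl_map, zero_add]
  rw [show (fun (s : Int) (k : Nat) => s + (k : Int)) = (fun s k => s + (fun k : Nat => (k : Int)) k) from rfl,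
    PySem.List.foldl_add]
  rw [zero_add, ← List.sum_toFinset _ (List.nodup_range), List.toFinset_range]
  rw [show (∑ k ∈ Finset.range n, ((k : Int))) = ((∑ k ∈ Finset.range n, k : Nat) : Int) by push_cast; rfl]
  rw [Finset.sum_range_id]

theorem floordiv_gauss (n : Nat) :
    PySem.Int.floordiv ((n : Int) * ((n : Int) - 1)) 2 = ((n * (n - 1) / 2 : Nat) : Int) := by
  match n with
  | 0 => simp [PySem.Int.floordiv]
  | Nat.succ m =>
    have h1 : ((Nat.succ m : Int)) * ((Nat.succ m : Int) - 1) = ((Nat.succ m * m : Nat) : Int) := by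
      push_cast; ring
    have h2 : Nat.succ m - 1 = m := rfl
    simp only [PySem.Int.floordiv, h1, h2]
    rw [show Int.fdiv ((Nat.succ m * m : Nat) : Int) 2 = ((Nat.succ m * m : Nat) : Int) / 2 by
      rw [Int.fdiv_eq_ediv]; simp]
    rw [show ((2 : Int)) = ((2 : Nat) : Int) from rfl, ← Int.natCast_div]

theorem regroup (L : List (Int × Int)) (F : Int × Int → Int) :
    ((PySem.Set.ofList (L.map Prod.fst)).map (fun k =>
        ((PySem.Set.ofList ((L.filter (fun p => p.1 == k)).map Prod.snd)).map (fun t => F (k, t))).sum)).sum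
      = ((PySem.Set.ofList L).map F).sum := by
  have hto : ∀ {α : Type} [DecidableEq α] [BEq α] [LawfulBEq α] (xs : List α),
      (PySem.Set.ofList xs).toFinset = xs.toFinset := by
    intro α _ _ _ xs
    ext x
    simp [List.mem_toFinset, PySem.Set.mem_ofList]
  rw [← List.sum_toFinset _ (PySem.Set.nodup_ofList _), hto]
  rw [← List.sum_toFinset _ (PySem.Set.nodup_ofList _), hto]
  have hinner : ∀ k : Int,
      ((PySem.Set.ofList ((L.filter (fun p => p.1 == k)).map Prod.snd)).map (fun t => F (k, t))).sum
        = ∑ p ∈ L.toFinset.filter (fun p => p.1 = k), F p := by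
    intro k
    rw [← List.sum_toFinset _ (PySem.Set.nodup_ofList _), hto]
    have himg : ((L.filter (fun p => p.1 == k)).map Prod.snd).toFinset
        = (L.toFinset.filter (fun p => p.1 = k)).image Prod.snd := by
      ext t
      simp [List.mem_filter]
    rw [himg, Finset.sum_image]
    · refine Finset.sum_congr rfl (fun p hp => ?_)
      have : p.1 = k := (Finset.mem_filter.mp hp).2
      rw [show (k, p.2) = p from by rw [← this]]
    · intro p hp q hq hpq
      have h1 : p.1 = k := (Finset.mem_filter.mp hp).2
      have h2 : q.1 = k := (Finset.mem_filter.mp hq).2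
      exact Prod.ext_iff.mpr ⟨h1.trans h2.symm, hpq⟩
  calc (∑ k ∈ (L.map Prod.fst).toFinset,
          ((PySem.Set.ofList ((L.filter (fun p => p.1 == k)).map Prod.snd)).map (fun t => F (k, t))).sum)
      = ∑ k ∈ (L.map Prod.fst).toFinset, ∑ p ∈ L.toFinset.filter (fun p => p.1 = k), F p :=
        Finset.sum_congr rfl (fun k _ => hinner k)
    _ = ∑ p ∈ L.toFinset, F p := by
        refine Finset.sum_fiberwise_of_maps_to ?_ F
        intro p hp
        simp only [List.mem_toFinset, List.mem_map] at hp ⊢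
        exact ⟨p, hp, rfl⟩

theorem foldA_flat : ∀ (E : List (Int × Int × Int)) (d : PySem.Dict Int (List (Int × Int))),
    E.foldl (fun d e =>
        (d.modify e.1 [] (fun l => l ++ [(e.2.1, e.2.2)])).modify e.2.1 [] (fun l => l ++ [(e.1, e.2.2)])) d
      = (E.flatMap (fun e => [(e.1, (e.2.1, e.2.2)), (e.2.1, (e.1, e.2.2))])).foldl
          (fun d p => d.modify p.1 [] (fun l => l ++ [p.2])) d := by
  intro E
  induction E with
  | nil => intro d; rfl
  | cons e E ih => intro d; simp only [List.foldl_cons, List.flatMap_cons, List.foldl_append]; rw [ih]; rfl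

theorem foldB_flat : ∀ (E : List (Int × Int × Int)) (d : PySem.Dict (Int × Int) Int),
    E.foldl (fun cnt e =>
        let c1 := cnt.insert (e.1, e.2.2) (cnt.getD (e.1, e.2.2) 0 + 1);
        c1.insert (e.2.1, e.2.2) (c1.getD (e.2.1, e.2.2) 0 + 1)) d
      = (E.flatMap (fun e => [(e.1, e.2.2), (e.2.1, e.2.2)])).foldl
          (fun d x => d.insert x (d.getD x 0 + 1)) d := by
  intro E
  induction E with
  | nil => intro d; rfl
  | cons e E ih => intro d; simp only [List.foldl_cons, List.flatMap_cons, List.foldl_append]; rw [ih]; rfl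

theorem filter_map_fst (L' : List (Int × Int × Int)) (k : Int) :
    ((L'.map (fun q => (q.1, q.2.2))).filter (fun p => p.1 == k)).map Prod.snd
      = ((L'.filter (fun p => p.1 == k)).map Prod.snd).map Prod.snd := by
  rw [List.filter_map, List.map_map, List.map_map]
  rfl

theorem map_fst_pm' (L' : List (Int × Int × Int)) :
    (L'.map (fun q => (q.1, q.2.2))).map Prod.fst = L'.map (fun x => x.1) := by
  rw [List.map_map]; rfl

theorem count_colors (L : List (Int × Int)) (k t : Int) :
    ((L.filter (fun p => p.1 == k)).map Prod.snd).count t = L.count (k, t) := by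
  simp only [List.count_eq_countP, List.countP_map, List.countP_filter]
  refine List.countP_congr (fun p _ => ?_)
  by_cases h1 : p.1 = k <;> by_cases h2 : p.2 = t <;>
    simp [Function.comp, h1, h2, Prod.ext_iff]

theorem set_update_nil {α : Type} [BEq α] (xs : List α) :
    PySem.Set.update ([] : List α) xs = PySem.Set.ofList xs := by
  simp [PySem.Set.update, PySem.Set.ofList]

theorem flat_pm (E : List (Int × Int × Int)) :
    E.flatMap (fun e => [(e.1, e.2.2), (e.2.1, e.2.2)])
      = (E.flatMap (fun e => [(e.1, (e.2.1, e.2.2)), (e.2.1, (e.1, e.2.2))])).map (fun q => (q.1, q.2.2)) := by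
  rw [List.map_flatMap]; rfl

theorem szlaki_eq_alt (a b c : List Int) (hb : a.length ≤ b.length) (hc : a.length ≤ c.length) :
    szlaki a b c = szlaki_alt a b c := by
  simp only [szlaki, szlaki_alt]
  have h1 := foldl_pyRange3 (fun (d : PySem.Dict Int (List (Int × Int))) x y t =>
      let d1 := if d.contains x then d else d.insert x []
      let d2 := if d1.contains y then d1 else d1.insert y []
      let d3 := d2.modify x [] (fun l => l ++ [(y, t)])
      d3.modify y [] (fun l => l ++ [(x, t)])) a b c hb hc PySem.Dict.empty
  rw [h1]
  rw [foldA _ _ (by rw [PySem.Dict.keys_empty]; exact List.nodup_nil)]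
  rw [foldA_flat]
  rw [foldB_flat]
  rw [PySem.Dict.foldl_insert_getD_add_one_eq_counter]
  rw [PySem.Dict.keys_foldl_modify_key _ Prod.fst ([] : List (Int × Int)) (fun _ p => (fun l => l ++ [p.2]))]
  rw [PySem.Dict.keys_empty, set_update_nil]
  have hg : ∀ k : Int, ((List.flatMap (fun e => [(e.1, e.2.1, e.2.2), (e.2.1, e.1, e.2.2)])
        (a.zip (b.zip c))).foldl (fun d p => d.modify p.1 [] fun l => l ++ [p.2]) PySem.Dict.empty).getD k []
      = ((List.flatMap (fun e => [(e.1, e.2.1, e.2.2), (e.2.1, e.1, e.2.2)]) (a.zip (b.zip c))).filter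
          (fun p => p.1 == k)).map Prod.snd := by
    intro k
    rw [PySem.Dict.getD_foldl_modify_append]
    simp [PySem.Dict.getD_empty]
  have hInner : ∀ l : List (Int × Int), l.foldl (fun d2 p =>
        (if d2.contains p.2 = true then d2 else d2.insert p.2 0).modify p.2 0 fun v => v + 1)
        PySem.Dict.empty
      = PySem.Dict.counter (l.map Prod.snd) := by
    intro l
    rw [foldInner l PySem.Dict.empty (by rw [PySem.Dict.keys_empty]; exact List.nodup_nil)]
    rw [PySem.Dict.counter_eq_foldl, List.foldl_map]
  simp only [hg, hInner]
  simp only [PySem.Dict.keys_counter, PySem.Dict.getD_counter]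
  simp only [sum_pyRange_gauss]
  simp only [PySem.List.foldl_add, zero_add]
  simp only [← filter_map_fst]
  simp only [count_colors]
  rw [flat_pm]
  rw [PySem.Dict.values_eq_map_keys _ (PySem.Dict.nodup_keys_counter _) 0]
  simp only [PySem.Dict.keys_counter, PySem.Dict.getD_counter, List.map_map, Function.comp_def]
  simp only [floordiv_gauss]
  rw [← map_fst_pm']
  exact regroup
    (List.map (fun q => (q.1, q.2.2))
      (List.flatMap (fun e => [(e.1, e.2.1, e.2.2), (e.2.1, e.1, e.2.2)]) (a.zip (b.zip c))))
    (fun p => (((List.count p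
          (List.map (fun q => (q.1, q.2.2))
            (List.flatMap (fun e => [(e.1, e.2.1, e.2.2), (e.2.1, e.1, e.2.2)]) (a.zip (b.zip c))))
        * (List.count p
          (List.map (fun q => (q.1, q.2.2))
            (List.flatMap (fun e => [(e.1, e.2.1, e.2.2), (e.2.1, e.1, e.2.2)]) (a.zip (b.zip c)))) - 1)
        / 2 : Nat) : Int)))


-- ===== VERDICT (by name: the statement is the Claim_ definition above) =====
theorem szlaki_spec : Claim_equal_szlaki := by
  intro a b c _ hpre
  unfold Spec_szlaki
  exact szlaki_eq_alt a b c hpre.1 hpre.2
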